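-- pv_equiv track=rewrite | github.com/zhengxueqian01/Edit-Verify-Reason | src/chart_agent/core/vision_tool_phase.py | _resolve_line_stroke
-- ===== SOURCE A (Python) =====
-- def _resolve_line_stroke(label: str, legend_map: dict[str, str]) -> str | None:
--     exact = {key.lower(): value for key, value in legend_map.items()}
--     if label.lower() in exact:
--         return exact[label.lower()]
--     for key, value in legend_map.items():
--         lowered = key.lower()
--         target = label.lower()
--         if target in lowered or lowered in target:
--             return value
--     return None
-- ===== SOURCE B (Python) =====
-- def _resolve_line_stroke(label: str, legend_map: dict[str, str]) -> str | None:
--     # Single pass: last-wins exact lowercase match, first-wins substring match.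
--     target = label.lower()
--     exact_val = None
--     first_substr = None
--     for key, value in legend_map.items():
--         lowered = key.lower()
--         if lowered == target:
--             exact_val = value
--         if first_substr is None and (target in lowered or lowered in target):
--             first_substr = value
--     return exact_val if exact_val is not None else first_substr
-- ===== Notes on version B (the rewrite author's own statement) =====
-- stated objective: simpler
-- what changed: Replaces A's two phases (build a lowercased dict index, then a second substring scan) by one single pass over the items that maintains a last-wins exact match and a first-wins substring match.
import Mathlib
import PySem

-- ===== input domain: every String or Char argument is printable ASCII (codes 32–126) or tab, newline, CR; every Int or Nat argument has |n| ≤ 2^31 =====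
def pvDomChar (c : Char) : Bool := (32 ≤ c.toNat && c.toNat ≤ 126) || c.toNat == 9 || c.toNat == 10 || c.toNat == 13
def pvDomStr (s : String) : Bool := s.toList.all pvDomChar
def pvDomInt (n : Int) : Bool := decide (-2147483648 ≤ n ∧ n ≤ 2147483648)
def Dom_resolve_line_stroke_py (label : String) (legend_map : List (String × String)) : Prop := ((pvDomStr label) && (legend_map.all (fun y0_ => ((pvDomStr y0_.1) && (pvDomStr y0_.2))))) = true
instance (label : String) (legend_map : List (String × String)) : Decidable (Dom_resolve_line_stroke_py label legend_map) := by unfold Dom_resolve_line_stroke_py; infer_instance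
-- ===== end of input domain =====

-- B collapses A's two phases (lowercased-dict index + second substring scan) into one
-- pass keeping a last-wins exact match and a first-wins substring match (objective: simpler).


-- ===== PORT A =====
-- the second loop of A: first pair whose lowered key is a substring of target or vice versa
def resolveLoopA (target : String) : List (String × String) → Option String
  | [] => none
  | (key, value) :: rest =>
      let lowered := PySem.Str.lower key
      if PySem.Str.isIn target lowered || PySem.Str.isIn lowered target then some value
      else resolveLoopA target rest

def resolve_line_stroke_py (label : String) (legend_map : List (String × String)) : Option String :=
  let exact : PySem.Dict String String :=
    legend_map.foldl (fun d p => d.insert (PySem.Str.lower p.1) p.2) PySem.Dict.empty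
  match exact.get? (PySem.Str.lower label) with
  | some v => some v
  | none => resolveLoopA (PySem.Str.lower label) legend_map

-- ===== PORT B =====
def resolve_line_stroke_py_alt (label : String) (legend_map : List (String × String)) : Option String :=
  let target := PySem.Str.lower label
  let st := legend_map.foldl (fun (st : Option String × Option String) p =>
      let lowered := PySem.Str.lower p.1
      let exactVal := if lowered == target then some p.2 else st.1
      let firstSub :=
        if st.2.isNone && (PySem.Str.isIn target lowered || PySem.Str.isIn lowered target)
        then some p.2 else st.2
      (exactVal, firstSub)) (none, none)
  match st.1 with
  | some v => some v
  | none => st.2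

-- ===== PRECONDITION & SPEC =====
def Spec_resolve_line_stroke_py (label : String) (legend_map : List (String × String)) (out : Option String) : Prop := out = resolve_line_stroke_py_alt label legend_map
instance (label : String) (legend_map : List (String × String)) (out : Option String) : Decidable (Spec_resolve_line_stroke_py label legend_map out) := by unfold Spec_resolve_line_stroke_py; infer_instance

-- ===== CLAIM (what is proved, stated in full; the proofs are below) =====
def Claim_equal_resolve_line_stroke_py : Prop := ∀ (label : String) (legend_map : List (String × String)), Dom_resolve_line_stroke_py label legend_map → Spec_resolve_line_stroke_py label legend_map (resolve_line_stroke_py label legend_map)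

-- ===== LEMMAS AND PROOFS =====

-- last exact match (value of the last pair whose lowered key equals the target)
def lastExact (t : String) (lm : List (String × String)) : Option String :=
  ((lm.reverse.find? (fun p => PySem.Str.lower p.1 == t)).map (·.2))

-- first substring match
def firstSub (t : String) (lm : List (String × String)) : Option String :=
  ((lm.find? (fun p =>
      PySem.Str.isIn t (PySem.Str.lower p.1) || PySem.Str.isIn (PySem.Str.lower p.1) t)).map (·.2))

theorem lastExact_cons (t : String) (k v : String) (rest : List (String × String)) :
    lastExact t ((k, v) :: rest) =
      match lastExact t rest with
      | some w => some w
      | none => if PySem.Str.lower k == t then some v else none := by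
  simp only [lastExact, List.reverse_cons, List.find?_append]
  cases h : (rest.reverse.find? (fun q => PySem.Str.lower q.1 == t)) <;>
    cases hb : (PySem.Str.lower k == t) <;>
      simp [List.find?, hb, h]

theorem dict_foldl_get? (t : String) (lm : List (String × String))
    (d : PySem.Dict String String) :
    (lm.foldl (fun d p => d.insert (PySem.Str.lower p.1) p.2) d).get? t =
      match lastExact t lm with
      | some v => some v
      | none => d.get? t := by
  induction lm generalizing d with
  | nil => simp [lastExact]
  | cons p rest ih =>
      obtain ⟨k, v⟩ := p
      simp only [List.foldl_cons, ih, lastExact_cons]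
      cases h : lastExact t rest with
      | some w => simp
      | none =>
          by_cases hk : PySem.Str.lower k == t
          · have hkeq : PySem.Str.lower k = t := by simpa using hk
            simp [hk, hkeq, PySem.Dict.get?_insert_self]
          · have hne : t ≠ PySem.Str.lower k := by
              intro he; exact hk (by simp [he])
            simp [hk, PySem.Dict.get?_insert_of_ne _ _ hne]

theorem loopA_eq_firstSub (t : String) (lm : List (String × String)) :
    resolveLoopA t lm = firstSub t lm := by
  induction lm with
  | nil => simp [resolveLoopA, firstSub]
  | cons p rest ih =>
      obtain ⟨k, v⟩ := p
      simp only [resolveLoopA, firstSub, List.find?]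
      cases hb : (PySem.Str.isIn t (PySem.Str.lower k) || PySem.Str.isIn (PySem.Str.lower k) t) <;>
        simp only [hb] <;> simp_all [firstSub, -PySem.Str.isIn_eq]

theorem foldB_inv (t : String) (lm : List (String × String)) (e s : Option String) :
    (lm.foldl (fun (st : Option String × Option String) p =>
      let lowered := PySem.Str.lower p.1
      let exactVal := if lowered == t then some p.2 else st.1
      let firstSubV :=
        if st.2.isNone && (PySem.Str.isIn t lowered || PySem.Str.isIn lowered t)
        then some p.2 else st.2
      (exactVal, firstSubV)) (e, s)) =
      ((match lastExact t lm with | some v => some v | none => e),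
       (match s with | some w => some w | none => firstSub t lm)) := by
  induction lm generalizing e s with
  | nil => cases s <;> simp [lastExact, firstSub]
  | cons p rest ih =>
      obtain ⟨k, v⟩ := p
      simp only [List.foldl_cons, ih, lastExact_cons, Prod.mk.injEq]
      refine ⟨?_, ?_⟩
      · cases h : lastExact t rest <;> cases hk : (PySem.Str.lower k == t) <;> simp [hk]
      · cases s with
        | some w => simp
        | none =>
            simp only [Option.isNone_none, Bool.true_and, firstSub, List.find?]
            cases hb : (PySem.Str.isIn t (PySem.Str.lower k) || PySem.Str.isIn (PySem.Str.lower k) t) <;>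
              simp only [hb] <;> simp_all [firstSub, -PySem.Str.isIn_eq]

-- ===== VERDICT (by name: the statement is the Claim_ definition above) =====
theorem resolve_line_stroke_py_spec : Claim_equal_resolve_line_stroke_py := by
  intro label lm _
  show resolve_line_stroke_py label lm = resolve_line_stroke_py_alt label lm
  simp only [resolve_line_stroke_py, resolve_line_stroke_py_alt,
    dict_foldl_get?, loopA_eq_firstSub, foldB_inv]
  cases lastExact (PySem.Str.lower label) lm <;>
    simp [PySem.Dict.get?_empty]
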